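-- pv_equiv track=rewrite | github.com/marslite/DSA-review | Week_1/coding_challenge.py | tuples_to_dictionary
-- ===== SOURCE A (Python) =====
-- def tuples_to_dictionary(input_list: list[tuple[str, int]]) -> dict[str, int]:
--   dicto = {}
--   for name,score in input_list:
--     if name in dicto:
--       if score > dicto[name]:
--         dicto[name] = score
--     else:
--       dicto[name] = score
--   return dicto
-- ===== SOURCE B (Python) =====
-- def tuples_to_dictionary(input_list: list[tuple[str, int]]) -> dict[str, int]:
--   groups = {}
--   for name, score in input_list:
--     groups.setdefault(name, []).append(score)
--   return {name: max(scores) for name, scores in groups.items()}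
-- ===== Notes on version B (the rewrite author's own statement) =====
-- stated objective: alternative
-- what changed: Replaces the single-pass running-max dict update with a two-phase group-then-reduce: first collect every score per name into lists, then map each name to max of its list.
import Mathlib
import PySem

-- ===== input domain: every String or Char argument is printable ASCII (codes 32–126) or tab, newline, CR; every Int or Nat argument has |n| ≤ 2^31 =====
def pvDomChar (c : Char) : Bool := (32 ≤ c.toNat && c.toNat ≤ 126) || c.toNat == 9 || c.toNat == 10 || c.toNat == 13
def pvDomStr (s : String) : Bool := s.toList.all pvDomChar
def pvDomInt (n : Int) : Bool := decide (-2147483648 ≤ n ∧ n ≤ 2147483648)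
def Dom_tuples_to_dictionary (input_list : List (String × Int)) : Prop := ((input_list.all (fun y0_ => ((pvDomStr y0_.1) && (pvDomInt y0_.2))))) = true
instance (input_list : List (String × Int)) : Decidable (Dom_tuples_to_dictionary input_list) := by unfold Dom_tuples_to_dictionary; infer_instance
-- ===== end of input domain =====

-- B replaces A's single-pass running-max dict with a two-phase group-then-reduce
-- (collect every score per name, then take max of each group); same cost, different structure.

-- ===== PORT A =====
-- one loop iteration of A: membership test, then either update-if-greater or insert
def pvStepA (d : PySem.Dict String Int) (p : String × Int) : PySem.Dict String Int :=
  match d.get? p.1 with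
  | some m => if p.2 > m then d.insert p.1 p.2 else d
  | none => d.insert p.1 p.2

def tuples_to_dictionary (input_list : List (String × Int)) : List (String × Int) :=
  (input_list.foldl pvStepA PySem.Dict.empty).items

-- ===== PORT B =====
-- Python max(scores); scores is always non-empty where B calls it (the [] case is unreachable)
def pvMax (l : List Int) : Int :=
  match l with
  | [] => 0
  | h :: t => t.foldl (fun a b => if b > a then b else a) h

-- groups.setdefault(name, []).append(score)  ==  groups[name] = groups.get(name, []) + [score]
def pvStepG (d : PySem.Dict String (List Int)) (p : String × Int) : PySem.Dict String (List Int) :=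
  d.modify p.1 [] (· ++ [p.2])

def tuples_to_dictionary_alt (input_list : List (String × Int)) : List (String × Int) :=
  ((input_list.foldl pvStepG PySem.Dict.empty).items).map (fun kl => (kl.1, pvMax kl.2))

-- ===== PRECONDITION & SPEC =====
def Spec_tuples_to_dictionary (input_list : List (String × Int)) (out : List (String × Int)) : Prop := out = tuples_to_dictionary_alt input_list
instance (input_list : List (String × Int)) (out : List (String × Int)) : Decidable (Spec_tuples_to_dictionary input_list out) := by unfold Spec_tuples_to_dictionary; infer_instance

-- ===== CLAIM (what is proved, stated in full; the proofs are below) =====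
def Claim_equal_tuples_to_dictionary : Prop := ∀ (input_list : List (String × Int)), Dom_tuples_to_dictionary input_list → Spec_tuples_to_dictionary input_list (tuples_to_dictionary input_list)

-- ===== LEMMAS AND PROOFS =====

-- the max-accumulator of A's loop, seen at one key
def pvMaxStep (o : Option Int) (v : Int) : Option Int :=
  some (match o with | none => v | some m => if v > m then v else m)

theorem pvStepA_get?_self (d : PySem.Dict String Int) (p : String × Int) :
    (pvStepA d p).get? p.1 = pvMaxStep (d.get? p.1) p.2 := by
  unfold pvStepA pvMaxStep
  cases h : d.get? p.1 with
  | none => simp [PySem.Dict.get?_insert_self]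
  | some m =>
    by_cases hg : p.2 > m <;> simp [hg, PySem.Dict.get?_insert_self, h]

theorem pvStepA_get?_ne (d : PySem.Dict String Int) (p : String × Int) (k : String)
    (hne : k ≠ p.1) : (pvStepA d p).get? k = d.get? k := by
  unfold pvStepA
  cases h : d.get? p.1 with
  | none => simp [PySem.Dict.get?_insert_of_ne d _ hne]
  | some m =>
    by_cases hg : p.2 > m <;> simp [hg, PySem.Dict.get?_insert_of_ne d _ hne]

theorem pvStepA_keys (d : PySem.Dict String Int) (p : String × Int) :
    (pvStepA d p).keys = PySem.Set.add d.keys p.1 := by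
  unfold pvStepA
  cases h : d.get? p.1 with
  | none =>
    have hc : d.contains p.1 = false := by
      rw [PySem.Dict.contains_eq_isSome_get?, h]; rfl
    rw [PySem.Dict.keys_insert_of_not_contains d _ hc,
      PySem.Set.add_of_not_mem ((PySem.Dict.get?_eq_none_iff_not_mem_keys d p.1).mp h)]
  | some m =>
    have hmem : p.1 ∈ d.keys := by
      by_contra hn
      rw [(PySem.Dict.get?_eq_none_iff_not_mem_keys d p.1).mpr hn] at h; cases h
    have hc : d.contains p.1 = true := (PySem.Dict.contains_iff_mem_keys d p.1).mpr hmem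
    by_cases hg : p.2 > m <;>
      simp [hg, PySem.Dict.keys_insert_of_contains d _ hc, PySem.Set.add_of_mem hmem]

-- A's fold: keys are the running set of names
theorem foldA_keys (xs : List (String × Int)) (d : PySem.Dict String Int) :
    (xs.foldl pvStepA d).keys = PySem.Set.update d.keys (xs.map (·.1)) := by
  induction xs generalizing d with
  | nil => simp [PySem.Set.update_nil]
  | cons p t ih =>
    simp only [List.foldl_cons, List.map_cons, PySem.Set.update_cons, ih, pvStepA_keys]

-- A's fold at one key: the running max of that key's scores
theorem foldA_get? (xs : List (String × Int)) (d : PySem.Dict String Int) (k : String) :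
    (xs.foldl pvStepA d).get? k
      = ((xs.filter (fun p => p.1 == k)).map (·.2)).foldl pvMaxStep (d.get? k) := by
  induction xs generalizing d with
  | nil => rfl
  | cons p t ih =>
    simp only [List.foldl_cons, List.filter_cons]
    by_cases hk : p.1 = k
    · subst hk
      simp only [BEq.rfl, if_pos, List.map_cons, List.foldl_cons, ih, pvStepA_get?_self]
    · have : (p.1 == k) = false := by simp [hk]
      rw [this]
      simp only [Bool.false_eq_true, if_false, ih]
      rw [pvStepA_get?_ne d p k (fun he => hk he.symm)]

-- the max-accumulator agrees with pvMax on a non-empty list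
theorem foldMax_some (t : List Int) (a : Int) :
    t.foldl pvMaxStep (some a) = some (t.foldl (fun a b => if b > a then b else a) a) := by
  induction t generalizing a with
  | nil => rfl
  | cons h t ih => simp only [List.foldl_cons, pvMaxStep, ih]

theorem foldMax_none (l : List Int) (hne : l ≠ []) :
    l.foldl pvMaxStep none = some (pvMax l) := by
  cases l with
  | nil => exact absurd rfl hne
  | cons h t => simp only [List.foldl_cons, pvMaxStep, pvMax, foldMax_some]

-- G's fold: keys are the same running set of names
theorem foldG_keys (xs : List (String × Int)) :
    (xs.foldl pvStepG PySem.Dict.empty).keys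
      = PySem.Set.update (PySem.Dict.empty (κ := String) (ν := List Int)).keys (xs.map (·.1)) := by
  exact PySem.Dict.keys_foldl_modify_key xs (·.1) [] (fun _ p l => l ++ [p.2]) PySem.Dict.empty

theorem foldG_getD (xs : List (String × Int)) (k : String) :
    (xs.foldl pvStepG PySem.Dict.empty).getD k []
      = (xs.filter (fun p => p.1 == k)).map (·.2) := by
  have := PySem.Dict.getD_foldl_modify_append xs (PySem.Dict.empty (κ := String) (ν := List Int)) k
  simpa [pvStepG, PySem.Dict.getD_empty] using this

-- ===== VERDICT (by name: the statement is the Claim_ definition above) =====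
theorem tuples_to_dictionary_spec : Claim_equal_tuples_to_dictionary := by
  intro xs _
  unfold Spec_tuples_to_dictionary tuples_to_dictionary tuples_to_dictionary_alt
  set A := xs.foldl pvStepA PySem.Dict.empty with hA
  set G := xs.foldl pvStepG PySem.Dict.empty with hG
  have hkA : A.keys = PySem.Set.ofList (xs.map (·.1)) := by
    rw [hA, foldA_keys]; simp [PySem.Dict.keys_empty, PySem.Set.update_nil_left]
  have hkG : G.keys = PySem.Set.ofList (xs.map (·.1)) := by
    rw [hG, foldG_keys]; simp [PySem.Dict.keys_empty, PySem.Set.update_nil_left]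
  have hndA : A.keys.Nodup := by rw [hkA]; exact PySem.Set.nodup_ofList _
  have hndG : G.keys.Nodup := by rw [hkG]; exact PySem.Set.nodup_ofList _
  rw [PySem.Dict.items_eq_map_keys A hndA 0, PySem.Dict.items_eq_map_keys G hndG [],
    List.map_map, hkA, hkG]
  apply List.map_congr_left
  intro k hk
  simp only [Function.comp]
  have hscne : (xs.filter (fun p => p.1 == k)).map (·.2) ≠ [] := by
    have : ∃ p ∈ xs, p.1 = k := by
      have := (PySem.Set.mem_ofList (xs.map (·.1)) k).mp hk
      simpa using this
    obtain ⟨p, hp, hpk⟩ := this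
    simp only [ne_eq, List.map_eq_nil_iff, List.filter_eq_nil_iff, not_forall]
    exact ⟨p, hp, by simp [hpk]⟩
  have hget : A.get? k = some (pvMax ((xs.filter (fun p => p.1 == k)).map (·.2))) := by
    rw [hA, foldA_get?]
    simp only [PySem.Dict.get?_empty]
    exact foldMax_none _ hscne
  rw [PySem.Dict.getD_of_get?_eq_some A 0 hget, foldG_getD]
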